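-- pv_equiv track=rewrite | github.com/OchiengPaul442/AirQualityAgent | src/utils/markdown_formatter.py | _clean_spacing
-- ===== SOURCE A (Python) =====
-- def _clean_spacing(text: str) -> str:
--     """
--     Clean up excessive spacing issues.
--     - Max 2 consecutive blank lines
--     - No spaces at end of lines
--     - Proper spacing around blocks
--     """
--     # Remove trailing spaces from lines
--     lines = [line.rstrip() for line in text.split("\n")]
--
--     # Collapse more than 2 consecutive blank lines to 2
--     cleaned_lines = []
--     blank_count = 0
--
--     for line in lines:
--         if not line.strip():
--             blank_count += 1
--             if blank_count <= 2:
--                 cleaned_lines.append(line)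
--         else:
--             blank_count = 0
--             cleaned_lines.append(line)
--
--     return "\n".join(cleaned_lines)
-- ===== SOURCE B (Python) =====
-- from itertools import groupby
--
--
-- def _clean_spacing(text: str) -> str:
--     """Run-based rewrite: group consecutive blank/non-blank lines and cap blank runs at 2."""
--     lines = [line.rstrip() for line in text.split("\n")]
--     out = []
--     for is_blank, run in groupby(lines, key=lambda l: l == ""):
--         if is_blank:
--             out.extend([""] * min(len(list(run)), 2))
--         else:
--             out.extend(run)
--     return "\n".join(out)
-- ===== Notes on version B (the rewrite author's own statement) =====
-- stated objective: idiomatic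
-- what changed: Replaced A's running blank-line counter and per-line conditional append by an itertools.groupby pass over maximal blank/non-blank runs, capping each blank run at two empty lines.
import Mathlib
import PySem

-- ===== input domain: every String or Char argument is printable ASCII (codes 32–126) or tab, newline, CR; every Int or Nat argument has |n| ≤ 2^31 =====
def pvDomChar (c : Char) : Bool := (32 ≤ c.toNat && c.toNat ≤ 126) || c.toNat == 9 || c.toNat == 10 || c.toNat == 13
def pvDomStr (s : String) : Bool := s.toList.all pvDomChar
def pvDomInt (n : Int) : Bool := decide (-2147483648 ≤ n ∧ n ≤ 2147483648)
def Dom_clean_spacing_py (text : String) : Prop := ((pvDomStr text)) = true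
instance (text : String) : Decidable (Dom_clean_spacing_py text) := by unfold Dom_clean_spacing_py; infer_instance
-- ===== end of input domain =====

-- B replaces A's running blank counter by an itertools.groupby pass over maximal blank/non-blank
-- runs, capping each blank run at two lines (idiomatic; same cost).

-- ===== PORT A =====
def clean_spacing_py (text : String) : String :=
  let lines := ((PySem.Str.split? text "\n").getD []).map PySem.Str.rstrip
  let res := lines.foldl
    (fun (st : Nat × List String) line =>
      if PySem.Str.strip line == "" then
        (st.1 + 1, if st.1 + 1 ≤ 2 then st.2 ++ [line] else st.2)
      else
        (0, st.2 ++ [line]))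
    (0, [])
  PySem.Str.join "\n" res.2

-- ===== PORT B =====
-- itertools.groupby on key (l == ""): the list of successive maximal runs of equal key
def pvRuns (ls : List String) : List (Bool × List String) :=
  match ls with
  | [] => []
  | l :: rest =>
    (l == "", l :: rest.takeWhile (fun x => (x == "") == (l == ""))) ::
      pvRuns (rest.dropWhile (fun x => (x == "") == (l == "")))
termination_by ls.length
decreasing_by
  exact Nat.lt_succ_of_le (List.length_dropWhile_le _ _)

def clean_spacing_py_alt (text : String) : String :=
  let lines := ((PySem.Str.split? text "\n").getD []).map PySem.Str.rstrip
  let out := (pvRuns lines).flatMap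
    (fun g => if g.1 then List.replicate (min g.2.length 2) "" else g.2)
  PySem.Str.join "\n" out

-- ===== PRECONDITION & SPEC =====
def Spec_clean_spacing_py (text : String) (out : String) : Prop := out = clean_spacing_py_alt text
instance (text : String) (out : String) : Decidable (Spec_clean_spacing_py text out) := by unfold Spec_clean_spacing_py; infer_instance

-- ===== CLAIM (what is proved, stated in full; the proofs are below) =====
def Claim_equal_clean_spacing_py : Prop := ∀ (text : String), Dom_clean_spacing_py text → Spec_clean_spacing_py text (clean_spacing_py text)

-- ===== LEMMAS AND PROOFS =====

-- A's loop, as a recursion on the line list with the blank counter as argument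
def pvLoopA (k : Nat) : List String → List String
  | [] => []
  | l :: ls =>
    if PySem.Str.strip l == "" then
      if k + 1 ≤ 2 then l :: pvLoopA (k + 1) ls else pvLoopA (k + 1) ls
    else l :: pvLoopA 0 ls

lemma pv_foldl_eq (ls : List String) : ∀ (k : Nat) (acc : List String),
    (ls.foldl
      (fun (st : Nat × List String) line =>
        if PySem.Str.strip line == "" then
          (st.1 + 1, if st.1 + 1 ≤ 2 then st.2 ++ [line] else st.2)
        else
          (0, st.2 ++ [line]))
      (k, acc)).2 = acc ++ pvLoopA k ls := by
  induction ls with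
  | nil => intro k acc; simp [pvLoopA]
  | cons l ls ih =>
    intro k acc
    rw [List.foldl_cons]
    simp only []
    by_cases h : PySem.Str.strip l == ""
    · by_cases hk : k + 1 ≤ 2
      · rw [if_pos h, if_pos hk, ih]
        simp [pvLoopA, h, hk]
      · rw [if_pos h, if_neg hk, ih]
        simp [pvLoopA, h, hk]
    · rw [if_neg h, ih]
      simp [pvLoopA, h]

-- head of a dropWhile fails the predicate
lemma pv_dropWhile_head {α : Type} (p : α → Bool) (l : List α) :
    ∀ x ∈ (l.dropWhile p).head?, p x = false := by
  induction l with
  | nil => simp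
  | cons a l ih =>
    intro x hx
    by_cases h : p a
    · exact ih x (by simpa [List.dropWhile, h] using hx)
    · simp [List.dropWhile, h] at hx
      simpa [hx] using h

lemma pv_rstrip_eq_nil_iff (z : List Char) :
    PySem.Chars.rstrip z = [] ↔ ∀ c ∈ z, PySem.Chars.isspace c = true := by
  simp [PySem.Chars.rstrip, List.dropWhile_eq_nil_iff]

-- key point: a line that has already been rstripped is all-whitespace only if it is empty
lemma pv_chars (cs : List Char) :
    PySem.Chars.strip (PySem.Chars.rstrip cs) = [] ↔ PySem.Chars.rstrip cs = [] := by
  constructor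
  · intro h
    have h1 : ∀ c ∈ PySem.Chars.lstrip (PySem.Chars.rstrip cs),
        PySem.Chars.isspace c = true := by
      have h2 : PySem.Chars.rstrip (PySem.Chars.lstrip (PySem.Chars.rstrip cs)) = [] := h
      exact (pv_rstrip_eq_nil_iff _).mp h2
    have hsp : ∀ c ∈ PySem.Chars.rstrip cs, PySem.Chars.isspace c = true := by
      intro c hc
      have hc' : c ∈ (PySem.Chars.rstrip cs).takeWhile PySem.Chars.isspace ++
          (PySem.Chars.rstrip cs).dropWhile PySem.Chars.isspace := by
        rw [List.takeWhile_append_dropWhile]; exact hc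
      rcases List.mem_append.mp hc' with h2 | h2
      · exact List.mem_takeWhile_imp h2
      · exact h1 c h2
    by_contra hne
    cases hh : (PySem.Chars.rstrip cs).reverse with
    | nil => exact hne (by simpa using congrArg List.reverse hh)
    | cons y t =>
      have hyd : y ∈ (cs.reverse.dropWhile PySem.Chars.isspace).head? := by
        have : (PySem.Chars.rstrip cs).reverse = cs.reverse.dropWhile PySem.Chars.isspace := by
          simp [PySem.Chars.rstrip]
        rw [← this, hh]; simp
      have hy : PySem.Chars.isspace y = false := pv_dropWhile_head _ _ y hyd
      have hmem : y ∈ PySem.Chars.rstrip cs := by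
        have : y ∈ (PySem.Chars.rstrip cs).reverse := by rw [hh]; simp
        simpa using this
      rw [hsp y hmem] at hy
      cases hy
  · intro h
    rw [show PySem.Chars.strip (PySem.Chars.rstrip cs) =
      PySem.Chars.rstrip (PySem.Chars.lstrip (PySem.Chars.rstrip cs)) from rfl, h]
    rfl

lemma pv_ofList_eq_empty_iff (x : List Char) : String.ofList x = "" ↔ x = [] := by
  constructor
  · intro hx
    have := congrArg String.toList hx
    simpa using this
  · intro hx
    rw [hx]

lemma pv_L1 (p : String) :
    (PySem.Str.strip (PySem.Str.rstrip p) == "") = (PySem.Str.rstrip p == "") := by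
  rw [Bool.eq_iff_iff]
  simp only [beq_iff_eq, PySem.Str.strip, PySem.Str.rstrip, String.toList_ofList,
    pv_ofList_eq_empty_iff]
  exact pv_chars p.toList

-- a leading non-blank group passes through A's loop unchanged, resetting the counter
lemma pv_loopA_nonblank (g : List String)
    (h : ∀ x ∈ g, (PySem.Str.strip x == "") = false) (ls : List String) :
    pvLoopA 0 (g ++ ls) = g ++ pvLoopA 0 ls := by
  induction g with
  | nil => simp
  | cons x g ih =>
    simp only [List.cons_append, pvLoopA, h x (by simp)]
    simp [ih fun y hy => h y (by simp [hy])]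

-- the counter is irrelevant when the next line is non-blank (or the list ends)
lemma pv_loopA_reset (k : Nat) (ls : List String)
    (h : ∀ x ∈ ls.head?, (PySem.Str.strip x == "") = false) :
    pvLoopA k ls = pvLoopA 0 ls := by
  cases ls with
  | nil => rfl
  | cons x t => simp [pvLoopA, h x (by simp)]

lemma pv_loopA_blank (n : Nat) (ls : List String) : ∀ (k : Nat),
    pvLoopA k (List.replicate n "" ++ ls) =
      List.replicate (min n (2 - k)) "" ++ pvLoopA (k + n) ls := by
  induction n with
  | zero => intro k; simp
  | succ n ih =>
    intro k
    have hblank : (PySem.Str.strip "" == "") = true := by decide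
    have harg : k + 1 + n = k + (n + 1) := by omega
    by_cases hk : k + 1 ≤ 2
    · have hmin : min (n + 1) (2 - k) = min n (2 - (k + 1)) + 1 := by omega
      simp only [List.replicate_succ, List.cons_append, pvLoopA, hblank, if_true,
        ih (k + 1), harg, hmin, if_pos hk]
    · have hmin : min (n + 1) (2 - k) = 0 := by omega
      have hmin2 : min n (2 - (k + 1)) = 0 := by omega
      simp only [List.replicate_succ, List.cons_append, pvLoopA, hblank, if_true,
        ih (k + 1), harg, hmin, hmin2, if_neg hk, List.replicate_zero, List.nil_append]

-- main induction: A's counter loop computes B's per-run result, run by run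
lemma pv_main (ls : List String)
    (h : ∀ l ∈ ls, (PySem.Str.strip l == "") = (l == "")) :
    pvLoopA 0 ls = (pvRuns ls).flatMap
      (fun g => if g.1 then List.replicate (min g.2.length 2) "" else g.2) := by
  match ls with
  | [] => rw [pvRuns.eq_def]; simp [pvLoopA]
  | l :: rest =>
    rw [pvRuns.eq_def]
    simp only
    have hsplit : rest.takeWhile (fun x => (x == "") == (l == "")) ++
        rest.dropWhile (fun x => (x == "") == (l == "")) = rest :=
      List.takeWhile_append_dropWhile
    have hdmem : ∀ x ∈ rest.dropWhile (fun x => (x == "") == (l == "")), x ∈ l :: rest :=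
      fun x hx => List.mem_cons_of_mem l ((List.dropWhile_sublist _).subset hx)
    have hrec := pv_main (rest.dropWhile (fun x => (x == "") == (l == "")))
      (fun x hx => h x (hdmem x hx))
    by_cases hb : l == ""
    · have hl : l = "" := by simpa using hb
      have hrep : l :: rest.takeWhile (fun x => (x == "") == (l == "")) =
          List.replicate ((rest.takeWhile (fun x => (x == "") == (l == ""))).length + 1) "" := by
        rw [List.eq_replicate_iff]
        refine ⟨by simp, ?_⟩
        intro x hx
        rcases List.mem_cons.mp hx with rfl | hx
        · exact hl
        · have := List.mem_takeWhile_imp hx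
          simp only [hb] at this
          simpa using this
      have hreset : pvLoopA (0 + ((rest.takeWhile (fun x => (x == "") == (l == ""))).length + 1))
          (rest.dropWhile (fun x => (x == "") == (l == ""))) =
          pvLoopA 0 (rest.dropWhile (fun x => (x == "") == (l == ""))) := by
        apply pv_loopA_reset
        intro x hx
        have hpred := pv_dropWhile_head _ rest x hx
        have hxmem : x ∈ rest.dropWhile (fun x => (x == "") == (l == "")) := by
          cases hd : rest.dropWhile (fun x => (x == "") == (l == "")) with
          | nil => simp [hd] at hx
          | cons y t => simp [hd] at hx ⊢; simp [hx]
        rw [h x (hdmem x hxmem)]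
        simp only [hb] at hpred
        simpa using hpred
      calc pvLoopA 0 (l :: rest)
          = pvLoopA 0 ((l :: rest.takeWhile (fun x => (x == "") == (l == ""))) ++
              rest.dropWhile (fun x => (x == "") == (l == ""))) := by
            rw [List.cons_append, hsplit]
        _ = _ := by
            rw [hrep, pv_loopA_blank, hreset, hrec]
            simp [hb]
    · have hg : ∀ x ∈ l :: rest.takeWhile (fun x => (x == "") == (l == "")),
          (PySem.Str.strip x == "") = false := by
        intro x hx
        rcases List.mem_cons.mp hx with rfl | hx
        · rw [h x (List.mem_cons_self)]
          simpa using hb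
        · have hpred := List.mem_takeWhile_imp hx
          have hxr : x ∈ l :: rest := List.mem_cons_of_mem l ((List.takeWhile_sublist _).subset hx)
          rw [h x hxr]
          revert hpred
          cases hxe : (x == "") <;> cases hbe : (l == "") <;> simp_all
      calc pvLoopA 0 (l :: rest)
          = pvLoopA 0 ((l :: rest.takeWhile (fun x => (x == "") == (l == ""))) ++
              rest.dropWhile (fun x => (x == "") == (l == ""))) := by
            rw [List.cons_append, hsplit]
        _ = _ := by
            rw [pv_loopA_nonblank _ hg, hrec]
            simp [hb]
termination_by ls.length
decreasing_by
  exact Nat.lt_succ_of_le (List.length_dropWhile_le _ _)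

-- ===== VERDICT (by name: the statement is the Claim_ definition above) =====
theorem clean_spacing_py_spec : Claim_equal_clean_spacing_py := by
  intro text _
  unfold Spec_clean_spacing_py clean_spacing_py clean_spacing_py_alt
  simp only
  rw [pv_foldl_eq, List.nil_append, pv_main]
  intro l hl
  obtain ⟨p, _, rfl⟩ := List.mem_map.mp hl
  exact pv_L1 p
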